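-- pv_equiv track=rewrite | github.com/kjetilh/UniverseSimulation | Documentation/relational_universe_bundle_v4/relational_universe_rule_delta_lab.py | summarise_events
-- ===== SOURCE A (Python) =====
-- from typing import Dict, Set, List, Optional, Tuple, Any
--
-- def markdown_table(rows: List[List[str]]) -> str:
--     if not rows:
--         return ""
--     header = "| " + " | ".join(rows[0]) + " |"
--     sep = "| " + " | ".join("---" for _ in rows[0]) + " |"
--     body = "\n".join("| " + " | ".join(r) + " |" for r in rows[1:])
--     return "\n".join([header, sep, body])
--
-- def summarise_events(event_rows: List[Dict[str, Any]]) -> str: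
--     rows = [["event", "count"]]
--     counts: Dict[str, int] = {}
--     for r in event_rows:
--         e = str(r["event"])
--         counts[e] = counts.get(e, 0) + 1
--     for e in sorted(counts):
--         rows.append([e, str(counts[e])])
--     return markdown_table(rows)
-- ===== SOURCE B (Python) =====
-- from itertools import groupby
-- from typing import Dict, List, Any
--
--
-- def markdown_table(rows: List[List[str]]) -> str:
--     if not rows:
--         return ""
--     header = "| " + " | ".join(rows[0]) + " |"
--     sep = "| " + " | ".join("---" for _ in rows[0]) + " |"
--     body = "\n".join("| " + " | ".join(r) + " |" for r in rows[1:])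
--     return "\n".join([header, sep, body])
--
--
-- def summarise_events(event_rows: List[Dict[str, Any]]) -> str:
--     events = sorted(str(r["event"]) for r in event_rows)
--     rows = [["event", "count"]]
--     for e, grp in groupby(events):
--         rows.append([e, str(len(list(grp)))])
--     return markdown_table(rows)
-- ===== Notes on version B (the rewrite author's own statement) =====
-- stated objective: alternative
-- what changed: B drops the intermediate count dictionary: it sorts the event strings first and counts run lengths with itertools.groupby in one pass over the sorted list, instead of building a dict of counts and then sorting its keys.
import Mathlib
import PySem

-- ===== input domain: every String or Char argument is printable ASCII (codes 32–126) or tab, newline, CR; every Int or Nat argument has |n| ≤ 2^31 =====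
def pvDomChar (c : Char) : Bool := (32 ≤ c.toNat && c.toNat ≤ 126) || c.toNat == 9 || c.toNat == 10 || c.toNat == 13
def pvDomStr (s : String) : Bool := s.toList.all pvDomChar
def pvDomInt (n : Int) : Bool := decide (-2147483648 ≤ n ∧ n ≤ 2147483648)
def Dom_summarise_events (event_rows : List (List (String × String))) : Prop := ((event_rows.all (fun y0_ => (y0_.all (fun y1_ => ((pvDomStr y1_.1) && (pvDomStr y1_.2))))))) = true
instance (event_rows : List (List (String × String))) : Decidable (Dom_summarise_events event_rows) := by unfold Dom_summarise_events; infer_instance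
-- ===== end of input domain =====

-- B replaces A's count dictionary by sort-then-groupby run-length counting (objective: alternative; same return value proved).

-- shared module helper (used verbatim by both Pythons); "a" + "b" + "c" is transliterated as join "" [...]
def markdown_table (rows : List (List String)) : String :=
  match rows with
  | [] => ""                       -- 'if not rows: return ""'
  | r0 :: rest =>
    let header := PySem.Str.join "" ["| ", PySem.Str.join " | " r0, " |"]
    let sep := PySem.Str.join "" ["| ", PySem.Str.join " | " (r0.map (fun _ => "---")), " |"]
    let body := PySem.Str.join "\n" (rest.map (fun r => PySem.Str.join "" ["| ", PySem.Str.join " | " r, " |"]))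
    PySem.Str.join "\n" [header, sep, body]

-- e = str(r["event"]) (both Pythons): the value is already a string, so str() is the identity;
-- r["event"] raises KeyError when the key is absent — excluded by Pre_ below (getD's default is then unreachable).
def evKey (r : List (String × String)) : String := (PySem.Dict.mk r).getD "event" ""

-- ===== PORT A =====
def summarise_events (event_rows : List (List (String × String))) : String :=
  let rows : List (List String) := [["event", "count"]]
  let counts : PySem.Dict String Int :=
    event_rows.foldl (fun d r => d.insert (evKey r) (d.getD (evKey r) 0 + 1)) PySem.Dict.empty
  let rows := (PySem.List.sorted counts.keys (fun x => x) false).foldl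
    (fun acc e => acc ++ [[e, PySem.Int.toStr (counts.getD e 0)]]) rows
  markdown_table rows

-- ===== PORT B =====
-- itertools.groupby over a sorted list: each run of equal elements yields one row [e, str(run length)]
def groupRows : List String → List (List String)
  | [] => []
  | x :: xs =>
    [x, PySem.Int.toStr ((xs.takeWhile (· == x)).length + 1 : Nat)] ::
      groupRows (xs.dropWhile (· == x))
termination_by l => l.length
decreasing_by
  simp only [List.length_cons]
  exact Nat.lt_succ_of_le (List.dropWhile_sublist _).length_le

def summarise_events_alt (event_rows : List (List (String × String))) : String :=
  let events := PySem.List.sorted (event_rows.map (fun r => evKey r)) (fun x => x) false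
  markdown_table (["event", "count"] :: groupRows events)

-- ===== PRECONDITION & SPEC =====
-- Pre_ excludes exactly the rows without an "event" key, on which both Pythons raise KeyError.
def Pre_summarise_events (event_rows : List (List (String × String))) : Prop :=
  ∀ r ∈ event_rows, "event" ∈ r.map Prod.fst
instance (event_rows : List (List (String × String))) : Decidable (Pre_summarise_events event_rows) := by unfold Pre_summarise_events; infer_instance

def pvWitness_summarise_events : (List (List (String × String))) :=
  [[("event", "b")], [("event", "a")], [("event", "b")]]

def Spec_summarise_events (event_rows : List (List (String × String))) (out : String) : Prop := out = summarise_events_alt event_rows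
instance (event_rows : List (List (String × String))) (out : String) : Decidable (Spec_summarise_events event_rows out) := by unfold Spec_summarise_events; infer_instance

-- ===== CLAIM (what is proved, stated in full; the proofs are below) =====
def Claim_equal_summarise_events : Prop := ∀ (event_rows : List (List (String × String))), Dom_summarise_events event_rows → Pre_summarise_events event_rows → Spec_summarise_events event_rows (summarise_events event_rows)

-- ===== LEMMAS AND PROOFS =====

-- the distinct keys in the order groupRows meets them (proof-side helper, mirrors groupRows' recursion)
def keysOf : List String → List String
  | [] => []
  | x :: xs => x :: keysOf (xs.dropWhile (· == x))
termination_by l => l.length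
decreasing_by
  simp only [List.length_cons]
  exact Nat.lt_succ_of_le (List.dropWhile_sublist _).length_le

theorem mem_dropWhile_gt {x y : String} {xs : List String}
    (h : xs.Pairwise (· ≤ ·)) (hy : y ∈ xs.dropWhile (· == x)) (hx : ∀ z ∈ xs, x ≤ z) :
    x < y := by
  induction xs with
  | nil => simp at hy
  | cons z t ih =>
    by_cases hz : z = x
    · subst hz
      simp only [List.dropWhile_cons, beq_self_eq_true] at hy
      exact ih h.tail hy (fun w hw => hx w (List.mem_cons_of_mem _ hw))
    · rw [List.dropWhile_cons_of_neg (by simpa using hz)] at hy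
      have hxz : x < z := lt_of_le_of_ne (hx z (List.mem_cons_self)) (Ne.symm hz)
      rcases List.mem_cons.mp hy with rfl | hy
      · exact hxz
      · exact lt_of_lt_of_le hxz (List.rel_of_pairwise_cons h hy)

theorem count_sorted_head {x : String} {xs : List String}
    (h : (x :: xs).Pairwise (· ≤ ·)) :
    (x :: xs).count x = (xs.takeWhile (· == x)).length + 1 := by
  rw [List.count_cons_self]
  congr 1
  conv_lhs => rw [← List.takeWhile_append_dropWhile (p := (· == x)) (l := xs), List.count_append]
  have h1 : (xs.takeWhile (· == x)).count x = (xs.takeWhile (· == x)).length := by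
    rw [List.count_eq_length]
    intro b hb; have := List.mem_takeWhile_imp hb; simpa using (by simpa using this : b = x).symm
  have h2 : (xs.dropWhile (· == x)).count x = 0 := by
    rw [List.count_eq_zero]
    intro hmem
    exact absurd (mem_dropWhile_gt h.tail hmem (fun z hz => List.rel_of_pairwise_cons h hz)) (lt_irrefl x)
  omega

theorem keysOf_mem {l : List String} (h : l.Pairwise (· ≤ ·)) {a : String} :
    a ∈ keysOf l ↔ a ∈ l := by
  induction l using keysOf.induct with
  | case1 => simp [keysOf]
  | case2 x xs ih =>
    rw [keysOf]
    have hd : (xs.dropWhile (· == x)).Pairwise (· ≤ ·) :=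
      List.Pairwise.sublist (List.dropWhile_sublist _) h.tail
    simp only [List.mem_cons, ih hd]
    constructor
    · rintro (rfl | ha)
      · exact Or.inl rfl
      · exact Or.inr ((List.dropWhile_sublist _).mem ha)
    · rintro (rfl | ha)
      · exact Or.inl rfl
      · by_cases hax : a = x
        · exact Or.inl hax
        · right
          conv at ha => rw [← List.takeWhile_append_dropWhile (p := (· == x)) (l := xs)]
          rcases List.mem_append.mp ha with h1 | h1
          · exact absurd (by simpa using List.mem_takeWhile_imp h1) hax
          · exact h1

theorem keysOf_pairwise_lt {l : List String} (h : l.Pairwise (· ≤ ·)) :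
    (keysOf l).Pairwise (· < ·) := by
  induction l using keysOf.induct with
  | case1 => simp [keysOf]
  | case2 x xs ih =>
    rw [keysOf]
    have hd : (xs.dropWhile (· == x)).Pairwise (· ≤ ·) :=
      List.Pairwise.sublist (List.dropWhile_sublist _) h.tail
    refine List.Pairwise.cons ?_ (ih hd)
    intro a ha
    have ha' : a ∈ xs.dropWhile (· == x) := (keysOf_mem hd).mp ha
    exact mem_dropWhile_gt h.tail ha' (fun z hz => List.rel_of_pairwise_cons h hz)

theorem groupRows_eq_map {l : List String} (h : l.Pairwise (· ≤ ·)) :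
    groupRows l = (keysOf l).map (fun e => [e, PySem.Int.toStr ((l.count e : Nat) : Int)]) := by
  induction l using groupRows.induct with
  | case1 => simp [groupRows, keysOf]
  | case2 x xs ih =>
    rw [groupRows, keysOf]
    have hd : (xs.dropWhile (· == x)).Pairwise (· ≤ ·) :=
      List.Pairwise.sublist (List.dropWhile_sublist _) h.tail
    rw [List.map_cons]
    congr 1
    · rw [count_sorted_head h]
    · rw [ih hd]
      apply List.map_congr_left
      intro e he
      have he' : e ∈ xs.dropWhile (· == x) := (keysOf_mem hd).mp he
      have hxe : x < e := mem_dropWhile_gt h.tail he' (fun z hz => List.rel_of_pairwise_cons h hz)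
      have hcount : (x :: xs).count e = (xs.dropWhile (· == x)).count e := by
        rw [List.count_cons_of_ne hxe.ne]
        conv_lhs => rw [← List.takeWhile_append_dropWhile (p := (· == x)) (l := xs), List.count_append]
        have : (xs.takeWhile (· == x)).count e = 0 := by
          rw [List.count_eq_zero]
          intro hm
          exact absurd (by simpa using List.mem_takeWhile_imp hm : e = x) (ne_of_gt hxe)
        omega
      rw [hcount]

theorem summarise_events_eq_alt (event_rows : List (List (String × String))) :
    summarise_events event_rows = summarise_events_alt event_rows := by
  unfold summarise_events summarise_events_alt
  simp only []
  set evs := event_rows.map (fun r => evKey r) with hevs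
  have hfold : event_rows.foldl (fun d r => d.insert (evKey r) (d.getD (evKey r) 0 + 1)) PySem.Dict.empty
      = PySem.Dict.counter evs := by
    rw [← PySem.Dict.foldl_insert_getD_add_one_eq_counter, hevs, List.foldl_map]
  rw [hfold]
  congr 1
  rw [PySem.List.foldl_append_singleton_eq_map]
  simp only [PySem.Dict.getD_counter, PySem.Dict.keys_counter, List.singleton_append]
  congr 1
  have hs : (PySem.List.sorted evs (fun x => x) false).Pairwise (· ≤ ·) := by
    have := PySem.List.sorted_pairwise evs (fun x => x)
    simpa using this
  rw [groupRows_eq_map hs]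
  have hcnt : ∀ e, (PySem.List.sorted evs (fun x => x) false).count e = evs.count e :=
    fun e => (PySem.List.sorted_perm evs (fun x => x) false).count_eq e
  have hkeys : PySem.List.sorted (PySem.Set.ofList evs) (fun x => x) false
      = keysOf (PySem.List.sorted evs (fun x => x) false) := by
    apply PySem.List.sorted_eq_of_perm_of_pairwise_lt
    · apply (List.perm_ext_iff_of_nodup ?_ ?_).mpr
      · intro a
        rw [keysOf_mem hs, PySem.List.mem_sorted, PySem.Set.mem_ofList]
      · exact (keysOf_pairwise_lt hs).imp (fun hab => ne_of_lt hab)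
      · exact PySem.Set.nodup_ofList evs
    · simpa using keysOf_pairwise_lt hs
  rw [hkeys]
  apply List.map_congr_left
  intro e he
  rw [hcnt e]

-- ===== VERDICT (by name: the statement is the Claim_ definition above) =====
theorem summarise_events_spec : Claim_equal_summarise_events := by
  intro event_rows _ _
  exact summarise_events_eq_alt event_rows
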